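-- pv_equiv track=rewrite | github.com/triposat/100_Days_Code_Challenge | Day10/Vertical_Concatenation_of_Matrix.py | Vertical_Concatenation
-- ===== SOURCE A (Python) =====
-- def Vertical_Concatenation(Test_list):
--     Result = []
--     n = 0
--     while n != len(Test_list):
--         temp = ''
--         for indexes in Test_list:
--             try:
--                 temp += indexes[n]
--             except IndexError:
--                 pass
--         n += 1
--         Result.append(temp)
--     return Result
-- ===== SOURCE B (Python) =====
-- def Vertical_Concatenation(Test_list):
--     Result = [''] * len(Test_list)
--     for row in Test_list:
--         for idx, ch in enumerate(row):
--             if idx < len(Test_list):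
--                 Result[idx] += ch
--     return Result
-- ===== Notes on version B (the rewrite author's own statement) =====
-- stated objective: alternative
-- what changed: Replaces the gather (one output column per outer while-iteration, rescanning all rows with try/except for each column) by a scatter: preallocate one accumulator per column and distribute each row's elements into them in a single enumerate pass, flipping the loop nesting and removing the exception handling.
import Mathlib
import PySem

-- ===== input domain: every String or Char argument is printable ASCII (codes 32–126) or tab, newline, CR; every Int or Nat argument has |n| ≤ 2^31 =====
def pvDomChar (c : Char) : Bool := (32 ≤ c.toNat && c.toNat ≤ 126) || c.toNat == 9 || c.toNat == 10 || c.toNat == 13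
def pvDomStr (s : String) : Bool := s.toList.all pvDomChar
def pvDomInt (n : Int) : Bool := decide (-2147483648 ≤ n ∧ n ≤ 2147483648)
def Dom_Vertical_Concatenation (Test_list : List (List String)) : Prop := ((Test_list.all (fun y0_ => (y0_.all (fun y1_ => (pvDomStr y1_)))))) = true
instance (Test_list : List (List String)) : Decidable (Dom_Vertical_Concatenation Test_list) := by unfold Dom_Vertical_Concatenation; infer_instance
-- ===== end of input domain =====

-- B replaces A's column-by-column gather (while-loop over column index, try/except
-- per row) by a transpose-style scatter into preallocated per-column accumulators.

-- ===== PORT A =====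
-- `while n != len(Test_list)` runs n = 0,…,len-1, appending one joined column per
-- iteration; `indexes[n]` with try/except IndexError is PySem.List.pyGet? (none = pass).
def Vertical_Concatenation (Test_list : List (List String)) : List String :=
  (List.range Test_list.length).foldl
    (fun Result (n : Nat) =>
      Result ++ [Test_list.foldl
        (fun temp indexes =>
          match PySem.List.pyGet? indexes (n : Int) with
          | some s => temp ++ s
          | none => temp) ""])
    []

-- ===== PORT B =====
-- scatter: Result = ['']*len, one enumerate pass per row; `Result[idx] += ch`
-- is a set at idx (the guard idx < len makes the index in range).
def Vertical_Concatenation_alt (Test_list : List (List String)) : List String :=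
  Test_list.foldl
    (fun Result row =>
      (PySem.List.enumerate row 0).foldl
        (fun Result p =>
          if p.1 < (Test_list.length : Int) then
            Result.set p.1.toNat (Result.getD p.1.toNat "" ++ p.2)
          else Result)
        Result)
    (List.replicate Test_list.length "")

-- ===== PRECONDITION & SPEC =====
def Spec_Vertical_Concatenation (Test_list : List (List String)) (out : List String) : Prop := out = Vertical_Concatenation_alt Test_list
instance (Test_list : List (List String)) (out : List String) : Decidable (Spec_Vertical_Concatenation Test_list out) := by unfold Spec_Vertical_Concatenation; infer_instance

-- ===== CLAIM (what is proved, stated in full; the proofs are below) =====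
def Claim_equal_Vertical_Concatenation : Prop := ∀ (Test_list : List (List String)), Dom_Vertical_Concatenation Test_list → Spec_Vertical_Concatenation Test_list (Vertical_Concatenation Test_list)

-- ===== LEMMAS AND PROOFS =====

-- the column string for column j, as A computes it row by row
def pvCol (Test_list : List (List String)) (j : Nat) : String :=
  Test_list.foldl (fun temp row => temp ++ row.getD j "") ""

theorem pvCol_aux (rows : List (List String)) (j : Nat) :
    ∀ acc : String, rows.foldl (fun temp row => temp ++ row.getD j "") acc
      = acc ++ pvCol rows j := by
  induction rows with
  | nil => intro acc; simp [pvCol]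
  | cons r rs ih =>
      intro acc
      simp only [pvCol, List.foldl_cons]
      rw [ih, ih ("" ++ r.getD j "")]
      simp [String.append_assoc]

theorem foldl_append_singleton {α β : Type} (f : α → β) (l : List α) :
    ∀ acc : List β, l.foldl (fun res n => res ++ [f n]) acc = acc ++ l.map f := by
  induction l with
  | nil => intro acc; simp
  | cons x xs ih => intro acc; simp [ih]

theorem portA_eq_map (tl : List (List String)) :
    Vertical_Concatenation tl = (List.range tl.length).map (fun j => pvCol tl j) := by
  unfold Vertical_Concatenation
  rw [foldl_append_singleton (fun n : Nat =>
    tl.foldl (fun temp indexes =>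
      match PySem.List.pyGet? indexes (n : Int) with
      | some s => temp ++ s
      | none => temp) "") (List.range tl.length) []]
  rw [List.nil_append]
  refine List.map_congr_left (fun n hn => ?_)
  unfold pvCol
  congr 1
  funext temp row
  rw [PySem.List.pyGet?_natCast]
  cases h : row[n]? with
  | none => simp [List.getD_eq_getElem?_getD, h]
  | some s => simp [List.getD_eq_getElem?_getD, h]

-- length of B's inner scatter state is preserved
theorem scatter_length (L : Nat) (ps : List (Int × String)) :
    ∀ st : List String,
      (ps.foldl (fun Result p =>
          if p.1 < (L : Int) then
            Result.set p.1.toNat (Result.getD p.1.toNat "" ++ p.2)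
          else Result) st).length = st.length := by
  induction ps with
  | nil => intro st; rfl
  | cons p ps ih =>
      intro st
      simp only [List.foldl_cons]
      split_ifs with h <;> rw [ih] <;> simp

-- one row scattered from start index s: position j gains row[j - s] (if present)
theorem scatter_get (L : Nat) (row : List String) :
    ∀ (s : Nat) (st : List String), st.length = L →
      ∀ (j : Nat) (hj : j < L),
        ((PySem.List.enumerate row (s : Int)).foldl (fun Result p =>
            if p.1 < (L : Int) then
              Result.set p.1.toNat (Result.getD p.1.toNat "" ++ p.2)
            else Result) st).getD j ""
          = st.getD j "" ++ (if s ≤ j then row.getD (j - s) "" else "") := by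
  induction row with
  | nil =>
      intro s st hst j hj
      simp [PySem.List.enumerate]
  | cons r rs ih =>
      intro s st hst j hj
      rw [show ((s : Int)) = ((s : Int) + 0) by ring] at *
      simp only [PySem.List.enumerate_cons, List.foldl_cons]
      have hstep :
          (if ((s : Int) + 0) < (L : Int) then
              st.set ((s : Int) + 0).toNat (st.getD ((s : Int) + 0).toNat "" ++ r)
            else st)
          = st.set s (st.getD s "" ++ r) := by
        split_ifs with h
        · norm_num
        · have hsL : ¬ s < L := by
            intro hc; exact h (by push_cast; omega)
          rw [List.set_eq_of_length_le (by omega)]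
      rw [hstep]
      have hlen : (st.set s (st.getD s "" ++ r)).length = L := by simp [hst]
      have := ih (s + 1) (st.set s (st.getD s "" ++ r)) hlen j hj
      rw [show ((s : Int) + 0 + 1) = (((s + 1 : Nat) : Int)) by push_cast; ring]
      rw [this]
      by_cases hsj : j = s
      · subst hsj
        have : j < st.length := by omega
        simp [List.getD_eq_getElem?_getD, List.getElem?_set_self (by omega)]
      · rw [List.getD_eq_getElem?_getD, List.getElem?_set_ne (by omega),
          ← List.getD_eq_getElem?_getD]
        by_cases hle : s ≤ j
        · have h1 : s + 1 ≤ j := by omega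
          have h2 : j - s = (j - (s + 1)) + 1 := by omega
          simp [hle, h1, h2]
        · have h1 : ¬ s + 1 ≤ j := by omega
          simp [hle, h1]

-- B's outer fold: position j of the state accumulates pvCol of the remaining rows
theorem portB_invariant (L : Nat) (rows : List (List String)) :
    ∀ st : List String, st.length = L →
      ∀ (j : Nat) (hj : j < L),
        (rows.foldl (fun Result row =>
            (PySem.List.enumerate row 0).foldl (fun Result p =>
              if p.1 < (L : Int) then
                Result.set p.1.toNat (Result.getD p.1.toNat "" ++ p.2)
              else Result) Result) st).getD j ""
          = st.getD j "" ++ pvCol rows j := by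
  induction rows with
  | nil => intro st hst j hj; simp [pvCol]
  | cons r rs ih =>
      intro st hst j hj
      simp only [List.foldl_cons]
      have hlen : ((PySem.List.enumerate r 0).foldl (fun Result p =>
          if p.1 < (L : Int) then
            Result.set p.1.toNat (Result.getD p.1.toNat "" ++ p.2)
          else Result) st).length = L := by
        rw [scatter_length]; exact hst
      rw [ih _ hlen j hj]
      have := scatter_get L r 0 st hst j hj
      rw [if_pos (Nat.zero_le j)] at this
      simp only [Nat.cast_zero, Nat.sub_zero] at this
      rw [this]
      rw [show pvCol (r :: rs) j = r.getD j "" ++ pvCol rs j from by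
        simp only [pvCol, List.foldl_cons]
        rw [pvCol_aux rs j, String.empty_append]
        rfl]
      rw [String.append_assoc]

theorem portB_length (tl : List (List String)) :
    (Vertical_Concatenation_alt tl).length = tl.length := by
  unfold Vertical_Concatenation_alt
  have : ∀ (rows : List (List String)) (st : List String),
      (rows.foldl (fun Result row =>
          (PySem.List.enumerate row 0).foldl (fun Result p =>
            if p.1 < (tl.length : Int) then
              Result.set p.1.toNat (Result.getD p.1.toNat "" ++ p.2)
            else Result) Result) st).length = st.length := by
    intro rows
    induction rows with
    | nil => intro st; rfl
    | cons r rs ih => intro st; rw [List.foldl_cons, ih, scatter_length]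
  rw [this]; simp

-- ===== VERDICT (by name: the statement is the Claim_ definition above) =====
theorem Vertical_Concatenation_spec : Claim_equal_Vertical_Concatenation := by
  intro tl _
  unfold Spec_Vertical_Concatenation
  apply List.ext_getElem
  · rw [portB_length, portA_eq_map]; simp
  · intro j h1 h2
    have hj : j < tl.length := by rw [portB_length] at h2; exact h2
    have hA : (Vertical_Concatenation tl)[j]'h1 = pvCol tl j := by
      have := portA_eq_map tl
      simp [this]
    have hB : (Vertical_Concatenation_alt tl).getD j "" = pvCol tl j := by
      unfold Vertical_Concatenation_alt
      rw [portB_invariant tl.length tl (List.replicate tl.length "") (by simp) j hj]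
      simp [List.getD_eq_getElem?_getD]
    rw [hA, ← hB, List.getD_eq_getElem?_getD, List.getElem?_eq_getElem h2]
    rfl
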